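-- pv_equiv track=rewrite | github.com/naqushab/ScalerAcademy | Scaler/Intermediate/Arrays - Interview Problems/HW1.py | solve
-- ===== SOURCE A (Python) =====
-- def solve(A):
--     s, e, ans = 0, 0, []
--     n = len(A)
--     while e < n:
--         if A[e] > 0:
--             e += 1
--             if e-s > len(ans):
--                 ans = A[s:e]
--         else:
--             s = e+1
--             e += 1
--     return ans
-- ===== SOURCE B (Python) =====
-- def solve(A):
--     # stage 1: split A into its maximal runs of positive numbers
--     runs, cur = [], []
--     for x in A:
--         if x > 0:
--             cur.append(x)
--         else:
--             if cur:
--                 runs.append(cur)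
--                 cur = []
--     if cur:
--         runs.append(cur)
--     # stage 2: pick the first longest run
--     best = []
--     for r in runs:
--         if len(r) > len(best):
--             best = r
--     return best
-- ===== Notes on version B (the rewrite author's own statement) =====
-- stated objective: faster
-- what changed: B is a staged algorithm: one pass splits A into the list of maximal positive runs, a second pass selects the first longest run, instead of A's scan that re-slices the array into the running best every time the current run grows.
import Mathlib
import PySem

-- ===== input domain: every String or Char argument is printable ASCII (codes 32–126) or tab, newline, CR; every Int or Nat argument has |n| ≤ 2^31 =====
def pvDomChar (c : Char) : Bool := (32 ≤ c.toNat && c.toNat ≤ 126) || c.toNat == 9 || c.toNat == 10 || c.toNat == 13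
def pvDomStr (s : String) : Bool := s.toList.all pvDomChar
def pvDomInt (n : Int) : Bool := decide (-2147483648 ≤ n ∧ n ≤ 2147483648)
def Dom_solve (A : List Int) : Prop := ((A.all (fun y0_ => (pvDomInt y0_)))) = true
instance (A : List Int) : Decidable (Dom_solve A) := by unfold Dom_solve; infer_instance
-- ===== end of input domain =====

-- B replaces A's scan (which re-slices the array into the running best on every run
-- extension) by a staged algorithm: split A into its maximal positive runs, then pick
-- the first longest run (faster: no repeated slicing).


-- ===== PORT A =====
-- the while-loop: state (s, e, ans); A[e] via pyGetD (always in range: 0 ≤ e < n)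
def solveGo (A : List Int) (n : Int) (s e : Int) (ans : List Int) : List Int :=
  if h : e < n then
    if PySem.List.pyGetD A e 0 > 0 then
      let e' := e + 1
      let ans' := if e' - s > (ans.length : Int) then PySem.List.slice A (some s) (some e') else ans
      solveGo A n s e' ans'
    else
      solveGo A n (e + 1) (e + 1) ans
  else ans
termination_by (n - e).toNat
decreasing_by all_goals omega

def solve (A : List Int) : List Int := solveGo A (A.length : Int) 0 0 []

-- ===== PORT B =====
-- stage 1: 'for x in A' splitting into maximal positive runs (cur appended element-wise)
def runsGo (xs : List Int) (cur : List Int) : List (List Int) :=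
  match xs with
  | [] => if cur ≠ [] then [cur] else []
  | x :: rest =>
    if x > 0 then runsGo rest (cur ++ [x])
    else if cur ≠ [] then cur :: runsGo rest [] else runsGo rest []

-- stage 2: 'for r in runs: if len(r) > len(best): best = r'
def bestFold (best : List Int) (rs : List (List Int)) : List Int :=
  rs.foldl (fun b r => if b.length < r.length then r else b) best

def solve_alt (A : List Int) : List Int := bestFold [] (runsGo A [])

-- ===== PRECONDITION & SPEC =====
def Spec_solve (A : List Int) (out : List Int) : Prop := out = solve_alt A
instance (A : List Int) (out : List Int) : Decidable (Spec_solve A out) := by unfold Spec_solve; infer_instance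

-- ===== CLAIM (what is proved, stated in full; the proofs are below) =====
def Claim_equal_solve : Prop := ∀ (A : List Int), Dom_solve A → Spec_solve A (solve A)

-- ===== LEMMAS AND PROOFS =====

lemma slice_len (A : List Int) (a b : Int) (ha : 0 ≤ a) (hab : a ≤ b) (hb : b ≤ (A.length : Int)) :
    ((PySem.List.slice A (some a) (some b)).length : Int) = b - a := by
  rw [PySem.List.slice_toNat A ha (le_trans ha hab)]
  simp only [List.length_take, List.length_drop]
  omega

lemma slice_nil (A : List Int) (a : Int) (ha : 0 ≤ a) :
    PySem.List.slice A (some a) (some a) = [] := by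
  rw [PySem.List.slice_toNat A ha ha]; simp

-- extending the slice A[s:e] to A[s:e+1] appends the element at index e
lemma slice_snoc (A : List Int) (s e : Int) (x : Int) (rest : List Int)
    (hs : 0 ≤ s) (hse : s ≤ e) (hdrop : A.drop e.toNat = x :: rest) :
    PySem.List.slice A (some s) (some (e + 1)) = PySem.List.slice A (some s) (some e) ++ [x] := by
  have he : 0 ≤ e := le_trans hs hse
  have hlt : e.toNat < A.length := by
    by_contra h
    have : A.drop e.toNat = [] := List.drop_eq_nil_of_le (by omega)
    rw [this] at hdrop; exact absurd hdrop (by simp)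
  have hx : A[e.toNat]? = some x := by
    have h0 : (A.drop e.toNat)[0]? = A[e.toNat + 0]? := List.getElem?_drop
    rw [hdrop] at h0
    simpa using h0.symm
  rw [PySem.List.slice_toNat A hs he, PySem.List.slice_toNat A hs (by omega)]
  have h1 : (e + 1).toNat - s.toNat = (e.toNat - s.toNat) + 1 := by omega
  rw [h1, List.take_add_one]
  congr 1
  have : (A.drop s.toNat)[e.toNat - s.toNat]? = A[e.toNat]? := by
    rw [List.getElem?_drop]; congr 1; omega
  rw [this, hx]; rfl

-- the first run produced from a nonempty current run extends it
lemma runsGo_head : ∀ (rest : List Int) (c : List Int), c ≠ [] →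
    ∃ t rs', runsGo rest c = (c ++ t) :: rs' := by
  intro rest
  induction rest with
  | nil => intro c hc; exact ⟨[], [], by simp [runsGo, hc]⟩
  | cons x rest ih =>
    intro c hc
    by_cases hx : x > 0
    · obtain ⟨t, rs', h⟩ := ih (c ++ [x]) (by simp)
      exact ⟨x :: t, rs', by simp [runsGo, hx, h]⟩
    · exact ⟨[], runsGo rest [], by simp [runsGo, hx, hc]⟩

-- main invariant: A's loop at (s, e, ans), with ans at least as long as the current run
-- A[s:e], equals B's bestFold of ans over the runs of the remaining tail
lemma go_eq (A : List Int) : ∀ (tl : List Int) (e s : Int) (ans : List Int),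
    A.drop e.toNat = tl → (e : Int) + tl.length = A.length →
    0 ≤ s → s ≤ e →
    (PySem.List.slice A (some s) (some e)).length ≤ ans.length →
    solveGo A (A.length : Int) s e ans = bestFold ans (runsGo tl (PySem.List.slice A (some s) (some e))) := by
  intro tl
  induction tl with
  | nil =>
    intro e s ans hdrop hlen hs0 hse hinv
    have he : e = (A.length : Int) := by simpa using hlen
    subst he
    rw [solveGo]
    simp only [lt_irrefl, dite_false, runsGo]
    by_cases hc : PySem.List.slice A (some s) (some (A.length : Int)) = []
    · simp [hc, bestFold]
    · rw [if_pos (by exact hc), bestFold]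
      simp only [List.foldl_cons, List.foldl_nil]
      rw [if_neg (by omega)]
  | cons x rest ih =>
    intro e s ans hdrop hlen hs0 hse hinv
    have he0 : 0 ≤ e := le_trans hs0 hse
    have hen : e < (A.length : Int) := by
      simp only [List.length_cons] at hlen; push_cast at hlen; omega
    have hx : PySem.List.pyGetD A e 0 = x := by
      rw [PySem.List.pyGetD_eq_getElem A 0 he0 hen]
      have hne : A.drop e.toNat ≠ [] := by rw [hdrop]; simp
      have h1 := List.head_drop hne
      rw [← h1]; simp [hdrop]
    have hdrop' : A.drop (e + 1).toNat = rest := by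
      have h2 : (e + 1).toNat = e.toNat + 1 := by omega
      rw [h2, ← List.tail_drop, hdrop, List.tail_cons]
    have hlen' : (e + 1 : Int) + (rest.length : Int) = A.length := by
      simp only [List.length_cons] at hlen; push_cast at hlen ⊢; omega
    have hcl : ((PySem.List.slice A (some s) (some e)).length : Int) = e - s :=
      slice_len A s e hs0 hse (by omega)
    rw [solveGo]
    simp only [hen, dite_true, hx]
    by_cases hpos : x > 0
    · simp only [hpos, if_true]
      have hsnoc := slice_snoc A s e x rest hs0 hse hdrop
      have hcl' : ((PySem.List.slice A (some s) (some (e + 1))).length : Int) = e + 1 - s :=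
        slice_len A s (e + 1) hs0 (by omega) (by omega)
      have hrg : runsGo (x :: rest) (PySem.List.slice A (some s) (some e))
          = runsGo rest (PySem.List.slice A (some s) (some (e + 1))) := by
        simp [runsGo, hpos, hsnoc]
      rw [hrg]
      by_cases hbig : e + 1 - s > (ans.length : Int)
      · simp only [hbig, if_true]
        rw [ih (e + 1) s _ hdrop' hlen' hs0 (by omega) (le_refl _)]
        -- both folds start from the first run, which extends the current run A[s:e+1]
        obtain ⟨t, rs', hh⟩ := runsGo_head rest (PySem.List.slice A (some s) (some (e + 1))) (by rw [hsnoc]; simp)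
        rw [hh]
        simp only [bestFold, List.foldl_cons]
        congr 1
        by_cases ht : t = []
        · subst ht
          rw [List.append_nil, if_neg (lt_irrefl _), if_pos (by omega)]
        · have htl : 0 < t.length := List.length_pos_of_ne_nil ht
          rw [if_pos (by simp only [List.length_append]; omega),
              if_pos (by simp only [List.length_append]; omega)]
      · simp only [hbig, if_false]
        rw [ih (e + 1) s ans hdrop' hlen' hs0 (by omega) (by omega)]
    · simp only [hpos, if_false]
      have hnil : PySem.List.slice A (some (e + 1)) (some (e + 1)) = [] :=
        slice_nil A (e + 1) (by omega)
      rw [ih (e + 1) (e + 1) ans hdrop' hlen' (by omega) (le_refl _) (by rw [hnil]; simp)]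
      rw [hnil]
      simp only [runsGo, hpos, if_false]
      by_cases hc : PySem.List.slice A (some s) (some e) = []
      · simp [hc]
      · simp only [hc, ne_eq, not_false_eq_true, if_true, bestFold, List.foldl]
        congr 1
        rw [if_neg (by omega)]

-- ===== VERDICT (by name: the statement is the Claim_ definition above) =====
theorem solve_spec : Claim_equal_solve := by
  intro A _
  unfold Spec_solve solve solve_alt
  rw [go_eq A A 0 0 [] (by simp) (by simp) le_rfl le_rfl (by rw [slice_nil A 0 le_rfl])]
  rw [slice_nil A 0 le_rfl]
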